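-- pv_equiv track=rewrite | github.com/ritikZ18/REST-api | assignment_2.py | merge_matrix
-- ===== SOURCE A (Python) =====
-- def merge_matrix(C11, C12, C21, C22):
--     n = len(C11)
--     C = [[0 for _ in range(2*n)] for _ in range(2*n)]
--     for i in range(n):
--         for j in range(n):
--             C[i][j] = C11[i][j]
--             C[i][j+n] = C12[i][j]
--             C[i+n][j] = C21[i][j]
--             C[i+n][j+n] = C22[i][j]
--     return C
-- ===== SOURCE B (Python) =====
-- def merge_matrix(C11, C12, C21, C22):
--     n = len(C11)
--     Q = [[C11, C12], [C21, C22]]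
--     return [[Q[i // n][j // n][i % n][j % n] for j in range(2 * n)]
--             for i in range(2 * n)]
-- ===== Notes on version B (the rewrite author's own statement) =====
-- stated objective: alternative
-- what changed: Replaces A's scatter (pre-allocate a 2n x 2n zero matrix, then nested loops over quadrant indices writing four cells per (i,j)) with a gather: a single expression over the output coordinates that reads each cell from the quadrant selected by a 2x2 table via i//n, j//n and i%n, j%n; no pre-allocation and no mutation.
import Mathlib
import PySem

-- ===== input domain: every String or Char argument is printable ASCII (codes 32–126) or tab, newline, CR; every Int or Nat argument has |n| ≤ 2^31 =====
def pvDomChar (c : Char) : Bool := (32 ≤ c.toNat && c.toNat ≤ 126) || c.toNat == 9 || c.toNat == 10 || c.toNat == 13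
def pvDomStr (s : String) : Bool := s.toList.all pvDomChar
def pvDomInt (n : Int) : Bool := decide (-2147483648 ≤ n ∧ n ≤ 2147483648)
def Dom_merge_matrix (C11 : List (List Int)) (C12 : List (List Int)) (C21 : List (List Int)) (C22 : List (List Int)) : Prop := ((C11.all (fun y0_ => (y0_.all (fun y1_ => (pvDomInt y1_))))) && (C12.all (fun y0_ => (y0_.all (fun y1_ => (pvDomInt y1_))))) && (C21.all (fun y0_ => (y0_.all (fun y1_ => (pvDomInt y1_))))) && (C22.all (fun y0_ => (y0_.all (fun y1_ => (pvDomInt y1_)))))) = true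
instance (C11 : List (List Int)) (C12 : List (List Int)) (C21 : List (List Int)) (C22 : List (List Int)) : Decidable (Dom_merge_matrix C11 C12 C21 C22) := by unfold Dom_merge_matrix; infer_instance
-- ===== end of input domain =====

-- B is a GATHER over the output grid: one expression reads cell (i, j) of the result from the quadrant
-- a 2×2 table selects via i // n, j // n — no pre-allocated zero matrix and no in-place scatter of four
-- cells per (i, j) as in A; alternative decomposition, same cost.

-- ===== PORT A =====
-- M[i][j] read; inside Pre_ all reads are in range, so the default is never returned
def pvCell (M : List (List Int)) (i j : Nat) : Int := (M.getD i []).getD j 0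
-- C[i][j] = v assignment
def pvSetCell (C : List (List Int)) (i j : Nat) (v : Int) : List (List Int) :=
  C.set i ((C.getD i []).set j v)
-- the body of A's inner loop: the four assignments for one (i, j)
def pvInner (C11 C12 C21 C22 : List (List Int)) (n i : Nat)
    (C : List (List Int)) (j : Nat) : List (List Int) :=
  pvSetCell (pvSetCell (pvSetCell (pvSetCell C i j (pvCell C11 i j))
    i (j+n) (pvCell C12 i j)) (i+n) j (pvCell C21 i j)) (i+n) (j+n) (pvCell C22 i j)

def merge_matrix (C11 : List (List Int)) (C12 : List (List Int)) (C21 : List (List Int)) (C22 : List (List Int)) : List (List Int) :=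
  let n := C11.length
  let C0 := (List.range (2*n)).map (fun _ => (List.range (2*n)).map (fun _ => (0 : Int)))
  (List.range n).foldl (fun C i => (List.range n).foldl (pvInner C11 C12 C21 C22 n i) C) C0

-- ===== PORT B =====
-- Python's i // n and i % n on the non-negative range indices are exactly Nat division/mod;
-- Q[i // n][j // n] (indices 0 or 1, always in range when the loop body runs) is read via getD like pvCell
def merge_matrix_alt (C11 : List (List Int)) (C12 : List (List Int)) (C21 : List (List Int)) (C22 : List (List Int)) : List (List Int) :=
  let n := C11.length
  let Q := [[C11, C12], [C21, C22]]
  (List.range (2*n)).map (fun i =>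
    (List.range (2*n)).map (fun j =>
      pvCell ((Q.getD (i / n) []).getD (j / n) []) (i % n) (j % n)))

-- ===== PRECONDITION & SPEC =====
-- Exactly the inputs on which Python A returns: every index read C11[i][j], C12[i][j], C21[i][j],
-- C22[i][j] with i, j < n = len(C11) is in range; outside it A raises IndexError.
def Pre_merge_matrix (C11 : List (List Int)) (C12 : List (List Int)) (C21 : List (List Int)) (C22 : List (List Int)) : Prop :=
  (∀ r ∈ C11, C11.length ≤ r.length) ∧
  (C11.length ≤ C12.length ∧ ∀ r ∈ C12.take C11.length, C11.length ≤ r.length) ∧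
  (C11.length ≤ C21.length ∧ ∀ r ∈ C21.take C11.length, C11.length ≤ r.length) ∧
  (C11.length ≤ C22.length ∧ ∀ r ∈ C22.take C11.length, C11.length ≤ r.length)
instance (C11 : List (List Int)) (C12 : List (List Int)) (C21 : List (List Int)) (C22 : List (List Int)) : Decidable (Pre_merge_matrix C11 C12 C21 C22) := by unfold Pre_merge_matrix; infer_instance

def pvWitness_merge_matrix : List (List Int) × List (List Int) × List (List Int) × List (List Int) :=
  ([[1,2],[3,4]], [[5,6],[7,8]], [[9,10],[11,12]], [[13,14],[15,16]])

def Spec_merge_matrix (C11 : List (List Int)) (C12 : List (List Int)) (C21 : List (List Int)) (C22 : List (List Int)) (out : List (List Int)) : Prop := out = merge_matrix_alt C11 C12 C21 C22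
instance (C11 : List (List Int)) (C12 : List (List Int)) (C21 : List (List Int)) (C22 : List (List Int)) (out : List (List Int)) : Decidable (Spec_merge_matrix C11 C12 C21 C22 out) := by unfold Spec_merge_matrix; infer_instance

-- ===== CLAIM (what is proved, stated in full; the proofs are below) =====
def Claim_equal_merge_matrix : Prop := ∀ (C11 : List (List Int)) (C12 : List (List Int)) (C21 : List (List Int)) (C22 : List (List Int)), Dom_merge_matrix C11 C12 C21 C22 → Pre_merge_matrix C11 C12 C21 C22 → Spec_merge_matrix C11 C12 C21 C22 (merge_matrix C11 C12 C21 C22)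


-- ===== LEMMAS AND PROOFS =====

theorem length_pvSetCell (C : List (List Int)) (i j : Nat) (v : Int) :
    (pvSetCell C i j v).length = C.length := by
  simp [pvSetCell]

theorem getD_pvSetCell_ne (C : List (List Int)) (i j p : Nat) (v : Int) (h : p ≠ i) :
    (pvSetCell C i j v).getD p [] = C.getD p [] := by
  simp [pvSetCell, List.getD_eq_getElem?_getD, Ne.symm h]

theorem getD_pvSetCell_self (C : List (List Int)) (i j : Nat) (v : Int) (h : i < C.length) :
    (pvSetCell C i j v).getD i [] = (C.getD i []).set j v := by
  simp [pvSetCell, List.getD_eq_getElem?_getD, h]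

theorem pvInner_length (C11 C12 C21 C22 : List (List Int)) (n i : Nat) (C : List (List Int)) (j : Nat) :
    (pvInner C11 C12 C21 C22 n i C j).length = C.length := by
  simp [pvInner, length_pvSetCell]

theorem pvInner_getD_fst (C11 C12 C21 C22 : List (List Int)) (n i : Nat) (C : List (List Int)) (j : Nat)
    (hn : 0 < n) (hi : i < C.length) :
    (pvInner C11 C12 C21 C22 n i C j).getD i []
      = ((C.getD i []).set j (pvCell C11 i j)).set (j+n) (pvCell C12 i j) := by
  unfold pvInner
  rw [getD_pvSetCell_ne _ _ _ _ _ (show i ≠ i + n by omega),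
      getD_pvSetCell_ne _ _ _ _ _ (show i ≠ i + n by omega),
      getD_pvSetCell_self _ _ _ _ (by rw [length_pvSetCell]; exact hi),
      getD_pvSetCell_self _ _ _ _ hi]

theorem pvInner_getD_snd (C11 C12 C21 C22 : List (List Int)) (n i : Nat) (C : List (List Int)) (j : Nat)
    (hn : 0 < n) (hin : i + n < C.length) :
    (pvInner C11 C12 C21 C22 n i C j).getD (i+n) []
      = ((C.getD (i+n) []).set j (pvCell C21 i j)).set (j+n) (pvCell C22 i j) := by
  unfold pvInner
  rw [getD_pvSetCell_self _ _ _ _ (by rw [length_pvSetCell, length_pvSetCell, length_pvSetCell]; exact hin),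
      getD_pvSetCell_self _ _ _ _ (by rw [length_pvSetCell, length_pvSetCell]; exact hin),
      getD_pvSetCell_ne _ _ _ _ _ (show i + n ≠ i by omega),
      getD_pvSetCell_ne _ _ _ _ _ (show i + n ≠ i by omega)]

theorem pvInner_getD_other (C11 C12 C21 C22 : List (List Int)) (n i p : Nat) (C : List (List Int)) (j : Nat)
    (h1 : p ≠ i) (h2 : p ≠ i + n) :
    (pvInner C11 C12 C21 C22 n i C j).getD p [] = C.getD p [] := by
  unfold pvInner
  rw [getD_pvSetCell_ne _ _ _ _ _ h2, getD_pvSetCell_ne _ _ _ _ _ h2,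
      getD_pvSetCell_ne _ _ _ _ _ h1, getD_pvSetCell_ne _ _ _ _ _ h1]

theorem innerFold_length (C11 C12 C21 C22 : List (List Int)) (n i : Nat) :
    ∀ (js : List Nat) (C : List (List Int)),
      (js.foldl (pvInner C11 C12 C21 C22 n i) C).length = C.length := by
  intro js
  induction js with
  | nil => intro C; rfl
  | cons j js ih => intro C; simp [List.foldl_cons, ih, pvInner_length]

theorem innerFold_getD_fst (C11 C12 C21 C22 : List (List Int)) (n i : Nat) (hn : 0 < n) :
    ∀ (js : List Nat) (C : List (List Int)), i < C.length → i + n ≤ C.length →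
      (js.foldl (pvInner C11 C12 C21 C22 n i) C).getD i []
        = js.foldl (fun R j => (R.set j (pvCell C11 i j)).set (j+n) (pvCell C12 i j)) (C.getD i []) := by
  intro js
  induction js with
  | nil => intro C _ _; rfl
  | cons j js ih =>
    intro C hi hin
    rw [List.foldl_cons, List.foldl_cons,
        ih _ (by rw [pvInner_length]; exact hi) (by rw [pvInner_length]; exact hin),
        pvInner_getD_fst _ _ _ _ _ _ _ _ hn hi]

theorem innerFold_getD_snd (C11 C12 C21 C22 : List (List Int)) (n i : Nat) (hn : 0 < n) :
    ∀ (js : List Nat) (C : List (List Int)), i + n < C.length →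
      (js.foldl (pvInner C11 C12 C21 C22 n i) C).getD (i+n) []
        = js.foldl (fun R j => (R.set j (pvCell C21 i j)).set (j+n) (pvCell C22 i j)) (C.getD (i+n) []) := by
  intro js
  induction js with
  | nil => intro C _; rfl
  | cons j js ih =>
    intro C hin
    rw [List.foldl_cons, List.foldl_cons,
        ih _ (by rw [pvInner_length]; exact hin),
        pvInner_getD_snd _ _ _ _ _ _ _ _ hn hin]

theorem innerFold_getD_other (C11 C12 C21 C22 : List (List Int)) (n i p : Nat)
    (h1 : p ≠ i) (h2 : p ≠ i + n) :
    ∀ (js : List Nat) (C : List (List Int)),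
      (js.foldl (pvInner C11 C12 C21 C22 n i) C).getD p [] = C.getD p [] := by
  intro js
  induction js with
  | nil => intro C; rfl
  | cons j js ih => intro C; rw [List.foldl_cons, ih, pvInner_getD_other _ _ _ _ _ _ _ _ _ h1 h2]

theorem rowFill_length' (xs ys : List Int) (n : Nat) (R : List Int) (m : Nat) :
    ((List.range m).foldl (fun R j => (R.set j (xs.getD j 0)).set (j+n) (ys.getD j 0)) R).length
      = R.length := by
  induction m with
  | zero => rfl
  | succ m ih =>
    rw [List.range_succ, List.foldl_append]
    simp only [List.foldl_cons, List.foldl_nil, List.length_set]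
    exact ih

-- filling one row: setting positions 0..n-1 from xs and n..2n-1 from ys overwrites all of R
theorem rowFill_aux (xs ys : List Int) (n : Nat) (R : List Int) (hR : R.length = 2*n) :
    ∀ m, m ≤ n → ∀ q,
      ((List.range m).foldl (fun R j => (R.set j (xs.getD j 0)).set (j+n) (ys.getD j 0)) R)[q]?
        = if q < m then some (xs.getD q 0)
          else if n ≤ q ∧ q < n + m then some (ys.getD (q-n) 0)
          else R[q]? := by
  intro m
  induction m with
  | zero =>
    intro _ q
    rw [List.range_zero, List.foldl_nil, if_neg (by omega), if_neg (by omega)]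
  | succ m ih =>
    intro hm q
    rw [List.range_succ, List.foldl_append, List.foldl_cons, List.foldl_nil]
    have hlen : ((List.range m).foldl
        (fun R j => (R.set j (xs.getD j 0)).set (j+n) (ys.getD j 0)) R).length = 2*n := by
      rw [rowFill_length', hR]
    simp only [List.getElem?_set, List.length_set, hlen]
    rw [ih (by omega) q]
    split_ifs <;> try rfl
    all_goals try omega
    next =>
      have h' : q - n = m := by omega
      rw [h']
    next =>
      have h' : q = m := by omega
      rw [h']

theorem rowFill (xs ys : List Int) (n : Nat)
    (R : List Int) (hR : R.length = 2*n) :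
    (List.range n).foldl (fun R j => (R.set j (xs.getD j 0)).set (j+n) (ys.getD j 0)) R
      = (List.range n).map (fun j => xs.getD j 0) ++ (List.range n).map (fun j => ys.getD j 0) := by
  apply List.ext_getElem?
  intro q
  rw [rowFill_aux xs ys n R hR n le_rfl q]
  by_cases h1 : q < n
  · rw [if_pos h1, List.getElem?_append_left (by simp; omega)]
    simp [List.getElem?_range h1]
  · rw [if_neg h1]
    by_cases h2 : q < 2*n
    · rw [if_pos (by omega), List.getElem?_append_right (by simp; omega)]
      simp only [List.length_map, List.length_range]
      rw [List.getElem?_map, List.getElem?_range (by omega : q - n < n)]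
      rfl
    · rw [if_neg (by omega), List.getElem?_eq_none (by omega : R.length ≤ q),
          List.getElem?_eq_none (by simp; omega)]

theorem outer_length (C11 C12 C21 C22 : List (List Int)) (n : Nat) (C0 : List (List Int)) (m : Nat) :
    ((List.range m).foldl (fun C i => (List.range n).foldl (pvInner C11 C12 C21 C22 n i) C) C0).length
      = C0.length := by
  induction m with
  | zero => rfl
  | succ m ih => rw [List.range_succ, List.foldl_append]; simp [innerFold_length, ih]

theorem outer_aux (C11 C12 C21 C22 : List (List Int)) (n : Nat) (hn : 0 < n)
    (C0 : List (List Int)) (hC0 : C0.length = 2*n)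
    (hz : ∀ p, p < 2*n → C0.getD p [] = (List.range (2*n)).map (fun _ => (0 : Int))) :
    ∀ m, m ≤ n → ∀ p,
      (((List.range m).foldl (fun C i => (List.range n).foldl (pvInner C11 C12 C21 C22 n i) C) C0).getD p [])
        = if p < m then
            (List.range n).map (fun j => pvCell C11 p j) ++ (List.range n).map (fun j => pvCell C12 p j)
          else if n ≤ p ∧ p < n + m then
            (List.range n).map (fun j => pvCell C21 (p-n) j) ++ (List.range n).map (fun j => pvCell C22 (p-n) j)
          else C0.getD p [] := by
  intro m
  induction m with
  | zero =>
    intro _ p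
    rw [List.range_zero, List.foldl_nil, if_neg (by omega), if_neg (by omega)]
  | succ m ih =>
    intro hm p
    rw [List.range_succ, List.foldl_append, List.foldl_cons, List.foldl_nil]
    have hflen : ((List.range m).foldl
        (fun C i => (List.range n).foldl (pvInner C11 C12 C21 C22 n i) C) C0).length = 2*n := by
      rw [outer_length, hC0]
    by_cases hp : p = m
    · subst hp
      rw [innerFold_getD_fst C11 C12 C21 C22 n p hn (List.range n) _
            (by rw [hflen]; omega) (by rw [hflen]; omega),
          ih (by omega) p, if_neg (by omega), if_neg (by omega), hz p (by omega),
          if_pos (by omega)]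
      simp only [pvCell]
      exact rowFill _ _ n _ (by simp)
    · by_cases hp2 : p = m + n
      · subst hp2
        rw [innerFold_getD_snd C11 C12 C21 C22 n m hn (List.range n) _ (by rw [hflen]; omega),
            ih (by omega) (m + n), if_neg (by omega), if_neg (by omega), hz (m + n) (by omega),
            if_neg (by omega), if_pos (show n ≤ m + n ∧ m + n < n + (m + 1) by omega)]
        have hmn : m + n - n = m := by omega
        rw [hmn]
        simp only [pvCell]
        exact rowFill _ _ n _ (by simp)
      · rw [innerFold_getD_other _ _ _ _ _ _ _ hp hp2, ih (by omega) p]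
        split_ifs <;> first | rfl | omega

-- one output row of B: splitting range (2n) = range n ++ (· + n) of range n evaluates j / n and j % n
theorem bRow (X Y : List (List Int)) (n : Nat) (hn : 0 < n) (q : Nat) :
    (List.range (2*n)).map (fun j => pvCell (([X, Y].getD (j / n) [])) q (j % n))
      = (List.range n).map (fun j => pvCell X q j) ++ (List.range n).map (fun j => pvCell Y q j) := by
  rw [two_mul, List.range_add, List.map_append, List.map_map]
  congr 1
  · apply List.map_congr_left
    intro j hj
    rw [List.mem_range] at hj
    rw [Nat.div_eq_of_lt hj, Nat.mod_eq_of_lt hj]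
    rfl
  · apply List.map_congr_left
    intro j hj
    rw [List.mem_range] at hj
    simp only [Function.comp]
    rw [Nat.add_comm n j, Nat.add_div_right _ hn, Nat.div_eq_of_lt hj,
        Nat.add_mod_right, Nat.mod_eq_of_lt hj]
    rfl

-- ===== VERDICT (by name: the statement is the Claim_ definition above) =====
theorem merge_matrix_spec : Claim_equal_merge_matrix := by
  intro C11 C12 C21 C22 _ _
  unfold Spec_merge_matrix merge_matrix merge_matrix_alt
  by_cases h0 : C11.length = 0
  · obtain rfl : C11 = [] := List.length_eq_zero_iff.mp h0
    simp
  · have hn : 0 < C11.length := by omega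
    have hC0len : ((List.range (2*C11.length)).map
        (fun _ => (List.range (2*C11.length)).map (fun _ => (0 : Int)))).length = 2*C11.length := by
      simp
    have hz : ∀ p, p < 2*C11.length →
        ((List.range (2*C11.length)).map
          (fun _ => (List.range (2*C11.length)).map (fun _ => (0 : Int)))).getD p []
          = (List.range (2*C11.length)).map (fun _ => (0 : Int)) := by
      intro p hp
      simp [List.getD_eq_getElem?_getD, hp]
    have haux := outer_aux C11 C12 C21 C22 C11.length hn _ hC0len hz C11.length le_rfl
    have hlen : ((List.range C11.length).foldl
        (fun C i => (List.range C11.length).foldl (pvInner C11 C12 C21 C22 C11.length i) C)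
        ((List.range (2*C11.length)).map
          (fun _ => (List.range (2*C11.length)).map (fun _ => (0 : Int))))).length
        = 2*C11.length := by
      rw [outer_length]; exact hC0len
    apply List.ext_getElem?
    intro p
    by_cases hp : p < 2*C11.length
    · rw [List.getElem?_eq_getElem (by rw [hlen]; omega),
          ← List.getD_eq_getElem _ [] (by rw [hlen]; omega), haux p,
          List.getElem?_map, List.getElem?_range hp, Option.map_some, Option.some_inj]
      by_cases hp1 : p < C11.length
      · rw [if_pos hp1, Nat.div_eq_of_lt hp1, Nat.mod_eq_of_lt hp1]
        rw [show ([[C11, C12], [C21, C22]].getD 0 []) = [C11, C12] from rfl,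
            ← bRow C11 C12 C11.length hn p]
      · rw [if_neg hp1, if_pos (by omega)]
        have hdiv : p / C11.length = 1 := by
          rw [show p = (p - C11.length) + C11.length by omega,
              Nat.add_div_right _ hn, Nat.div_eq_of_lt (by omega)]
        have hmod : p % C11.length = p - C11.length := by
          conv_lhs => rw [show p = (p - C11.length) + C11.length by omega]
          rw [Nat.add_mod_right, Nat.mod_eq_of_lt (by omega)]
        rw [hdiv, hmod]
        rw [show ([[C11, C12], [C21, C22]].getD 1 []) = [C21, C22] from rfl,
            ← bRow C21 C22 C11.length hn (p - C11.length)]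
    · rw [List.getElem?_eq_none (by rw [hlen]; omega),
          List.getElem?_eq_none (by simp; omega)]
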